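-- pv_equiv track=rewrite | github.com/Usergeee443/cefr | app.py | _order_parts_for_user
-- ===== SOURCE A (Python) =====
-- def _order_parts_for_user(parts: list, seen_ids: list, test_id: str) -> list:
--     """Partlarni avval ko'rilmaganlar (part_number tartibida), keyin ko'rilganlar (part_number tartibida) qilib qaytaradi."""
--     if not parts:
--         return parts
--     unseen = []
--     seen = []
--     for p in parts:
--         pid = test_id + "_" + str(p.get("part_number", 0))
--         if pid in seen_ids:
--             seen.append(p)
--         else:
--             unseen.append(p)
--     # Part_number bo'yicha tartiblash (random emas, tartibda)
--     unseen.sort(key=lambda p: p.get("part_number", 0))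
--     seen.sort(key=lambda p: p.get("part_number", 0))
--     return unseen + seen
-- ===== SOURCE B (Python) =====
-- def _order_parts_for_user(parts: list, seen_ids: list, test_id: str) -> list:
--     """One stable sort on the composite key (seen?, part_number): unseen (False) sorts
--     before seen (True), each group ordered by part_number — no partition step needed."""
--     def key(p):
--         pn = p.get("part_number", 0)
--         return (test_id + "_" + str(pn) in seen_ids, pn)
--     return sorted(parts, key=key)
-- ===== Notes on version B (the rewrite author's own statement) =====
-- stated objective: simpler
-- what changed: A partitions the list into unseen/seen with a loop and then runs two separate sorts and concatenates; B performs a single stable sort on the lexicographic key (seen-flag, part_number) and never partitions at all.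
import Mathlib
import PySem

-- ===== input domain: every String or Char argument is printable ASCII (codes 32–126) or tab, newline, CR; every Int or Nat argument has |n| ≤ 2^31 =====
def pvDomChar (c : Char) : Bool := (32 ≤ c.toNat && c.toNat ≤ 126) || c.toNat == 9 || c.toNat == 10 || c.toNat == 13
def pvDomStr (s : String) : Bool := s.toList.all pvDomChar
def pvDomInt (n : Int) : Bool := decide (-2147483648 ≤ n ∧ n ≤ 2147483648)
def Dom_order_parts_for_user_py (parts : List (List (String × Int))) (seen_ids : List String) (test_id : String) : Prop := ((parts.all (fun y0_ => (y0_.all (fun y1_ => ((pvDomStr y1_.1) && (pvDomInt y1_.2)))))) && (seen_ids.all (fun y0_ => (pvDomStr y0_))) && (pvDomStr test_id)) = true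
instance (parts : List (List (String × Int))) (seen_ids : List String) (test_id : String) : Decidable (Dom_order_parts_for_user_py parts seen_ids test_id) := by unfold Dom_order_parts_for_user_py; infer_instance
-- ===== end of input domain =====

-- B replaces A's partition-loop + two sorts + concatenation by ONE stable sort on the
-- lexicographic key (seen?, part_number) — simpler: no partition step at all.

-- p.get("part_number", 0) (shared by both ports; the dict is an assoc list, later keys overwrite)
def pvPartNum (p : List (String × Int)) : Int :=
  (PySem.Dict.ofList p).getD "part_number" 0

-- test_id + "_" + str(...) in seen_ids (shared by both ports)
def pvIsSeen (seen_ids : List String) (test_id : String) (p : List (String × Int)) : Bool :=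
  seen_ids.contains (test_id ++ "_" ++ PySem.Int.toStr (pvPartNum p))

-- ===== PORT A =====
-- for-loop appending to the pair (unseen, seen); then each half is sorted; unseen + seen
def order_parts_for_user_py (parts : List (List (String × Int))) (seen_ids : List String) (test_id : String) : List (List (String × Int)) :=
  if parts = [] then parts
  else
    let us := parts.foldl
      (fun (acc : List (List (String × Int)) × List (List (String × Int))) p =>
        if pvIsSeen seen_ids test_id p then (acc.1, acc.2 ++ [p]) else (acc.1 ++ [p], acc.2))
      ([], [])
    PySem.List.sorted us.1 pvPartNum ++ PySem.List.sorted us.2 pvPartNum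

-- ===== PORT B =====
-- sorted(parts, key=lambda p: (pid in seen_ids, p.get("part_number", 0))) — one stable sort
-- on the tuple key; the Bool component ports Python's False < True ordering exactly.
def order_parts_for_user_py_alt (parts : List (List (String × Int))) (seen_ids : List String) (test_id : String) : List (List (String × Int)) :=
  PySem.List.sorted2 parts (fun p => pvIsSeen seen_ids test_id p) pvPartNum

-- ===== PRECONDITION & SPEC =====
def Spec_order_parts_for_user_py (parts : List (List (String × Int))) (seen_ids : List String) (test_id : String) (out : List (List (String × Int))) : Prop := out = order_parts_for_user_py_alt parts seen_ids test_id
instance (parts : List (List (String × Int))) (seen_ids : List String) (test_id : String) (out : List (List (String × Int))) : Decidable (Spec_order_parts_for_user_py parts seen_ids test_id out) := by unfold Spec_order_parts_for_user_py; infer_instance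

-- ===== CLAIM =====
def Claim_equal_order_parts_for_user_py : Prop := ∀ (parts : List (List (String × Int))) (seen_ids : List String) (test_id : String), Dom_order_parts_for_user_py parts seen_ids test_id → Spec_order_parts_for_user_py parts seen_ids test_id (order_parts_for_user_py parts seen_ids test_id)

-- ===== LEMMAS AND PROOFS =====

-- A's partition loop IS a pair of filters (in input order).
theorem pv_foldl_pair_filter {α : Type} (c : α → Bool) (xs : List α)
    (u s : List α) :
    xs.foldl (fun (acc : List α × List α) p =>
        if c p then (acc.1, acc.2 ++ [p]) else (acc.1 ++ [p], acc.2)) (u, s)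
      = (u ++ xs.filter (fun p => !c p), s ++ xs.filter c) := by
  induction xs generalizing u s with
  | nil => simp
  | cons x xs ih =>
    by_cases hx : c x = true <;>
      simp [List.foldl_cons, hx, ih]

-- insertion with the composite (flag, key) order into an unseen-block ++ seen-block list
-- lands inside the block matching x's flag, where it behaves like plain key-insertion
theorem pv_insertBy2_append {α : Type} (c : α → Bool) (k : α → Int) (x : α)
    (U S : List α) (hU : ∀ u ∈ U, c u = false) (hS : ∀ s ∈ S, c s = true) :
    PySem.List.insertBy
        (fun a b => decide (c a < c b) || (!decide (c b < c a) && decide (k a < k b))) x (U ++ S)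
      = if c x then U ++ PySem.List.insertBy (fun a b => decide (k a < k b)) x S
        else PySem.List.insertBy (fun a b => decide (k a < k b)) x U ++ S := by
  induction U with
  | nil =>
    simp only [List.nil_append]
    induction S with
    | nil => cases hcx : c x <;> simp [PySem.List.insertBy]
    | cons s S ihS =>
      have hs : c s = true := hS s (by simp)
      have hS' : ∀ z ∈ S, c z = true := fun z hz => hS z (by simp [hz])
      cases hcx : c x
      · simp [PySem.List.insertBy, hcx, hs]
      · have h := ihS hS'
        rw [hcx, if_pos rfl] at h
        simp only [PySem.List.insertBy, hcx, hs]
        by_cases hk : k x < k s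
        · simp [hk]
        · simp [hk, h]
  | cons u U ihU =>
    have hu : c u = false := hU u (by simp)
    have hU' : ∀ z ∈ U, c z = false := fun z hz => hU z (by simp [hz])
    cases hcx : c x
    · have h := ihU hU'
      rw [hcx, if_neg (by simp)] at h
      simp only [List.cons_append, PySem.List.insertBy, hcx, hu]
      by_cases hk : k x < k u
      · simp [hk]
      · simp [hk, h]
    · have h := ihU hU'
      rw [hcx, if_pos rfl] at h
      simp only [List.cons_append, PySem.List.insertBy, hcx, hu]
      simp [h]

-- the single stable sort on (flag, key) is the two per-flag sorts concatenated
theorem pv_sorted2_split {α : Type} (c : α → Bool) (k : α → Int) (xs : List α) :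
    PySem.List.sorted2 xs c k
      = PySem.List.sorted (xs.filter (fun p => !c p)) k ++ PySem.List.sorted (xs.filter c) k := by
  induction xs using List.reverseRecOn with
  | nil => simp [PySem.List.sorted2, PySem.List.sorted_eq_foldl_insertBy]
  | append_singleton xs x ih =>
    have hstep : PySem.List.sorted2 (xs ++ [x]) c k
        = PySem.List.insertBy
            (fun a b => decide (c a < c b) || (!decide (c b < c a) && decide (k a < k b))) x
            (PySem.List.sorted2 xs c k) := by
      simp [PySem.List.sorted2, List.foldl_append]
    have hsortstep : ∀ ys : List α, PySem.List.sorted (ys ++ [x]) k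
        = PySem.List.insertBy (fun a b => decide (k a < k b)) x (PySem.List.sorted ys k) := by
      intro ys
      simp [PySem.List.sorted_eq_foldl_insertBy, List.foldl_append]
    have hU : ∀ u ∈ PySem.List.sorted (xs.filter (fun p => !c p)) k, c u = false := by
      intro u hu
      have := (PySem.List.mem_sorted _ _ _ _).mp hu
      simpa using (List.mem_filter.mp this).2
    have hS : ∀ s ∈ PySem.List.sorted (xs.filter c) k, c s = true := by
      intro s hs
      have := (PySem.List.mem_sorted _ _ _ _).mp hs
      exact (List.mem_filter.mp this).2
    rw [hstep, ih, pv_insertBy2_append c k x _ _ hU hS]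
    cases hcx : c x
    · simp [hcx, List.filter_append, hsortstep]
    · simp [hcx, List.filter_append, hsortstep]

-- ===== VERDICT =====
theorem order_parts_for_user_py_spec : Claim_equal_order_parts_for_user_py := by
  intro parts seen_ids test_id _
  unfold Spec_order_parts_for_user_py order_parts_for_user_py order_parts_for_user_py_alt
  by_cases hp : parts = []
  · simp [hp, PySem.List.sorted2]
  · simp only [hp, if_false]
    rw [pv_foldl_pair_filter, pv_sorted2_split]
    simp
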